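-- pv_equiv track=rewrite | github.com/musralina/algorithms | BinarySearch/SigmaTrimpasation.py | analyze_trimpazation
-- ===== SOURCE A (Python) =====
-- quantum_a = 7**5
--
-- quantum_m = 2**31 - 1
--
-- def analyze_trimpazation(n, m, q0):
--     '''
--     This function generates data with given parameters
--     and calculates desired Y value.
--     You need to modify it to make it execute faster.
--     You can check your progress using estimate_execution_time flag
--     at the top of the file.
--     '''
--     m_div2 = m // 2
--     q = q0
--
--     r = m
--     count = [0] * r
--
--     for i in range(n):
--         x = q % m
--         count[x] += 1
--         q = ((q * quantum_a) % quantum_m)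
--
--     i = 0
--     res = 0
--     # Build the output character array
--     for j in range(len(count)):
--         if count[j] != 0:
--             a = i + 1
--             b = a + (count[j] - 1)
--             s = (a + b) * count[j] // 2
--             res += s * (j - m_div2)
--             i += count[j]
--
--     return res
-- ===== SOURCE B (Python) =====
-- quantum_a = 7**5
--
-- quantum_m = 2**31 - 1
--
-- def analyze_trimpazation(n, m, q0):
--     # Sort the n generated samples and aggregate rank sums over runs of
--     # equal values, instead of building and scanning an array of size m.
--     m_div2 = m // 2
--     q = q0
--     vals = []
--     for _ in range(n):
--         vals.append(q % m)
--         q = (q * quantum_a) % quantum_m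
--     vals.sort()
--     res = 0
--     k = 0
--     total = len(vals)
--     while k < total:
--         j = vals[k]
--         c = 1
--         while k + c < total and vals[k + c] == j:
--             c += 1
--         res += (2 * k + 1 + c) * c // 2 * (j - m_div2)
--         k += c
--     return res
-- ===== Notes on version B (the rewrite author's own statement) =====
-- stated objective: alternative
-- what changed: B generates the n samples into a list, sorts it, and aggregates the rank sums over runs of equal values in one scan, instead of building and scanning a count array of size m.
import Mathlib
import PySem

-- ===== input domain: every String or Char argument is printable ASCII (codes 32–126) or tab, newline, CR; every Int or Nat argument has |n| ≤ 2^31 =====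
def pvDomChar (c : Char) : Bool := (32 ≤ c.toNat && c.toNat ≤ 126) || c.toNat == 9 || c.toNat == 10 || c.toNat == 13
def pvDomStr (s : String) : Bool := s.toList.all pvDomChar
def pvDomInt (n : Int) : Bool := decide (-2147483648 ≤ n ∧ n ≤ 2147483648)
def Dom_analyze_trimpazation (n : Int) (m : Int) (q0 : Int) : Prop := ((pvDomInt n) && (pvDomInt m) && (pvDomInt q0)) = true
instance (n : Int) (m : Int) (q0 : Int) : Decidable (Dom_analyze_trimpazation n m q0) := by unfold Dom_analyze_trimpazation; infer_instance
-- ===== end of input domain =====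

-- B sorts the n generated samples and aggregates rank sums over runs of equal
-- values, instead of building and scanning a count array of size m (objective: alternative algorithm).

def quantum_a : Int := 7 ^ 5

def quantum_m : Int := 2 ^ 31 - 1

-- ===== PORT A =====
-- Python's count is a mutable list mutated by index: ported as an Array.
-- body of A's generation loop: x = q % m; count[x] += 1; q = (q * quantum_a) % quantum_m
-- (indexing via .toNat / getD is exact for the indices A reaches inside Pre_: 0 ≤ x < m = len(count))
def pvStepA (m : Int) (st : Int × Array Int) : Int × Array Int :=
  let x := PySem.Int.mod st.1 m
  (PySem.Int.mod (st.1 * quantum_a) quantum_m,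
   st.2.setIfInBounds x.toNat (st.2.getD x.toNat 0 + 1))

-- body of A's second loop over j; state is (i, res)
def pvBodyA (m_div2 : Int) (count : Array Int) (ir : Int × Int) (j : Int) : Int × Int :=
  let cj := count.getD j.toNat 0
  if cj ≠ 0 then
    let a := ir.1 + 1
    let b := a + (cj - 1)
    let s := PySem.Int.floordiv ((a + b) * cj) 2
    (ir.1 + cj, ir.2 + s * (j - m_div2))
  else ir

def analyze_trimpazation (n : Int) (m : Int) (q0 : Int) : Int :=
  let m_div2 := PySem.Int.floordiv m 2
  let st := (PySem.List.pyRange 0 n 1).foldl (fun st _ => pvStepA m st)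
              (q0, Array.replicate m.toNat 0)
  ((PySem.List.pyRange 0 ((st.2.size : Nat) : Int) 1).foldl (pvBodyA m_div2 st.2) (0, 0)).2

-- ===== PORT B =====
-- body of B's generation loop: vals.append(q % m); q = (q * quantum_a) % quantum_m
def pvStepB (m : Int) (st : Int × Array Int) : Int × Array Int :=
  (PySem.Int.mod (st.1 * quantum_a) quantum_m, st.2.push (PySem.Int.mod st.1 m))

-- B's while loop over the sorted values: j = vals[k]; count the run of equal
-- successors (the inner while), add the rank sum, advance k by the run length.
-- The index scan is rendered as the same left-to-right scan consuming the list.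
def pvScan (m_div2 : Int) (k : Int) (res : Int) : List Int → Int
  | [] => res
  | j :: rest =>
      let c : Int := 1 + ((rest.takeWhile (fun y => y == j)).length : Int)
      pvScan m_div2 (k + c)
        (res + PySem.Int.floordiv ((2 * k + 1 + c) * c) 2 * (j - m_div2))
        (rest.dropWhile (fun y => y == j))
  termination_by l => l.length
  decreasing_by
    have := List.length_dropWhile_le (fun y => y == j) rest
    simp only [List.length_cons]
    omega

def analyze_trimpazation_alt (n : Int) (m : Int) (q0 : Int) : Int :=
  let m_div2 := PySem.Int.floordiv m 2
  let st := (PySem.List.pyRange 0 n 1).foldl (fun st _ => pvStepB m st) (q0, #[])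
  pvScan m_div2 0 0 (st.2.toList.mergeSort (fun a b => decide (a ≤ b)))

-- ===== PRECONDITION & SPEC =====
-- Pre_ excludes exactly the inputs where A raises: with n ≥ 1, m = 0 is a ZeroDivisionError
-- (q % m) and m < 0 an IndexError (count is the empty list [0]*m).
def Pre_analyze_trimpazation (n : Int) (m : Int) (_q0 : Int) : Prop := 0 < m ∨ n ≤ 0
instance (n : Int) (m : Int) (q0 : Int) : Decidable (Pre_analyze_trimpazation n m q0) := by unfold Pre_analyze_trimpazation; infer_instance

def pvWitness_analyze_trimpazation : Int × Int × Int := (3, 5, 42)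

def Spec_analyze_trimpazation (n : Int) (m : Int) (q0 : Int) (out : Int) : Prop := out = analyze_trimpazation_alt n m q0
instance (n : Int) (m : Int) (q0 : Int) (out : Int) : Decidable (Spec_analyze_trimpazation n m q0 out) := by unfold Spec_analyze_trimpazation; infer_instance

-- ===== CLAIM (what is proved, stated in full; the proofs are below) =====
def Claim_equal_analyze_trimpazation : Prop := ∀ (n : Int) (m : Int) (q0 : Int), Dom_analyze_trimpazation n m q0 → Pre_analyze_trimpazation n m q0 → Spec_analyze_trimpazation n m q0 (analyze_trimpazation n m q0)

-- ===== LEMMAS AND PROOFS =====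

-- the LCG successor and the generated residue sequence
def pvNext (q : Int) : Int := PySem.Int.mod (q * quantum_a) quantum_m

def pvGen (m : Int) : Int → Nat → List Int
  | _, 0 => []
  | q, Nat.succ k => PySem.Int.mod q m :: pvGen m (pvNext q) k

-- list form of A's count update
def pvUpd (c : List Int) (x : Int) : List Int :=
  c.set x.toNat (c.getD x.toNat 0 + 1)

-- the common aggregation step, parametrised by the count function; state (i, res)
def pvF (md2 : Int) (cnt : Int → Int) (ir : Int × Int) (j : Int) : Int × Int :=
  (ir.1 + cnt j,
   ir.2 + PySem.Int.floordiv ((2 * ir.1 + 1 + cnt j) * cnt j) 2 * (j - md2))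

-- the first element of each run (the distinct values, in order)
def pvHeads : List Int → List Int
  | [] => []
  | j :: rest => j :: pvHeads (rest.dropWhile (fun y => y == j))
  termination_by l => l.length
  decreasing_by
    have := List.length_dropWhile_le (fun y => y == j) rest
    simp only [List.length_cons]
    omega

lemma pv_arr_getD (a : Array Int) (i : Nat) (d : Int) : a.getD i d = a.toList.getD i d := by
  by_cases h : i < a.size
  · rw [Array.getD, dif_pos h, List.getD_eq_getElem _ _ (by simpa using h)]
    simp
  · rw [Array.getD, dif_neg h, List.getD_eq_default _ _ (by simpa using h)]

lemma pv_foldl_ignore {α β : Type} (f : β → β) (l : List α) :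
    ∀ s : β, l.foldl (fun b _ => f b) s = f^[l.length] s := by
  induction l with
  | nil => intro s; rfl
  | cons x xs ih =>
      intro s
      simp only [List.foldl_cons, List.length_cons, Function.iterate_succ_apply, ih]

lemma pv_iterA (m : Int) (k : Nat) :
    ∀ (q : Int) (a : Array Int),
      ((pvStepA m)^[k] (q, a)).2.toList = (pvGen m q k).foldl pvUpd a.toList := by
  induction k with
  | zero => intro q a; rfl
  | succ k ih =>
      intro q a
      rw [Function.iterate_succ_apply]
      show ((pvStepA m)^[k]
        (pvNext q, a.setIfInBounds (PySem.Int.mod q m).toNat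
          (a.getD (PySem.Int.mod q m).toNat 0 + 1))).2.toList = _
      rw [ih, pvGen, List.foldl_cons]
      congr 1
      rw [Array.toList_setIfInBounds, pv_arr_getD]
      rfl

lemma pv_iterB (m : Int) (k : Nat) :
    ∀ (q : Int) (a : Array Int),
      ((pvStepB m)^[k] (q, a)).2.toList = a.toList ++ pvGen m q k := by
  induction k with
  | zero => intro q a; simp [pvGen]
  | succ k ih =>
      intro q a
      rw [Function.iterate_succ_apply]
      show ((pvStepB m)^[k] (pvNext q, a.push (PySem.Int.mod q m))).2.toList = _
      rw [ih, Array.toList_push, pvGen]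
      simp

lemma pv_gen_bounds (m : Int) (hm : 0 < m) (k : Nat) :
    ∀ q, ∀ x ∈ pvGen m q k, 0 ≤ x ∧ x < m := by
  induction k with
  | zero => intro q x hx; simp [pvGen] at hx
  | succ k ih =>
      intro q x hx
      rw [pvGen, List.mem_cons] at hx
      rcases hx with hx | hx
      · exact hx ▸ ⟨PySem.Int.mod_nonneg q hm, PySem.Int.mod_lt q hm⟩
      · exact ih _ _ hx

lemma pv_updA_spec (xs : List Int) :
    ∀ (c : List Int), (∀ x ∈ xs, 0 ≤ x ∧ x < (c.length : Int)) →
      (xs.foldl pvUpd c).length = c.length ∧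
      ∀ (j : Int), 0 ≤ j → j < (c.length : Int) →
        (xs.foldl pvUpd c).getD j.toNat 0 = c.getD j.toNat 0 + xs.count j := by
  induction xs with
  | nil => intro c _; exact ⟨rfl, fun j _ _ => by simp⟩
  | cons x xs ih =>
      intro c hb
      have hx := hb x List.mem_cons_self
      obtain ⟨xn, rfl⟩ : ∃ k : Nat, x = (k : Int) := ⟨x.toNat, by omega⟩
      have hxlen : xn < c.length := by omega
      have hupd : pvUpd c (xn : Int) = c.set xn (c.getD xn 0 + 1) := by
        simp [pvUpd]
      have hlen' : (pvUpd c (xn : Int)).length = c.length := by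
        rw [hupd]; exact List.length_set ..
      have hb' : ∀ y ∈ xs, 0 ≤ y ∧ y < ((pvUpd c (xn : Int)).length : Int) := by
        intro y hy; rw [hlen']; exact hb y (List.mem_cons_of_mem _ hy)
      obtain ⟨ihl, ihg⟩ := ih (pvUpd c (xn : Int)) hb'
      constructor
      · rw [List.foldl_cons, ihl, hlen']
      · intro j hj0 hjlt
        obtain ⟨jn, rfl⟩ : ∃ k : Nat, j = (k : Int) := ⟨j.toNat, by omega⟩
        have hjlen : jn < c.length := by omega
        rw [List.foldl_cons, ihg (jn : Int) hj0 (by rw [hlen']; exact hjlt), hupd,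
            List.count_cons]
        simp only [Int.toNat_natCast]
        rw [List.getD_eq_getElem _ _ (by simpa using hjlen),
            List.getD_eq_getElem _ _ hjlen, List.getElem_set]
        by_cases hjx : xn = jn
        · subst hjx
          simp only [beq_self_eq_true, if_true]
          rw [List.getD_eq_getElem _ _ hxlen]
          push_cast
          ring
        · have hne : ((xn : Int)) ≠ ((jn : Int)) := fun h => hjx (by exact_mod_cast h)
          simp only [if_neg hjx, beq_iff_eq, if_neg hne]
          push_cast
          ring

lemma pv_bodyA_eq (md2 : Int) (count : Array Int) (ir : Int × Int) (j : Int) :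
    pvBodyA md2 count ir j = pvF md2 (fun j => count.getD j.toNat 0) ir j := by
  unfold pvBodyA pvF
  by_cases h : count.getD j.toNat 0 ≠ 0
  · rw [if_pos h]
    have : ir.1 + 1 + (ir.1 + 1 + (count.getD j.toNat 0 - 1))
        = 2 * ir.1 + 1 + count.getD j.toNat 0 := by ring
    simp only [this]
  · rw [if_neg h]
    have h0 : count.getD j.toNat 0 = 0 := not_not.mp h
    simp [h0, PySem.Int.floordiv]

lemma pv_foldl_filter {α β : Type} (f : β → α → β) (p : α → Bool)
    (h : ∀ s x, p x = false → f s x = s) :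
    ∀ (l : List α) (s : β), l.foldl f s = (l.filter p).foldl f s := by
  intro l
  induction l with
  | nil => intro s; rfl
  | cons x xs ih =>
      intro s
      by_cases hp : p x
      · rw [List.foldl_cons, List.filter_cons_of_pos hp, List.foldl_cons, ih]
      · rw [List.foldl_cons, h s x (by simpa using hp),
            List.filter_cons_of_neg (by simpa using hp), ih]

lemma pv_heads_subset : ∀ (l : List Int), ∀ v ∈ pvHeads l, v ∈ l := by
  intro l
  induction l using pvHeads.induct with
  | case1 => intro v hv; simp [pvHeads] at hv
  | case2 j rest ih =>
      intro v hv
      rw [pvHeads, List.mem_cons] at hv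
      rcases hv with hv | hv
      · exact hv ▸ List.mem_cons_self
      · exact List.mem_cons_of_mem _
          ((List.dropWhile_sublist _).mem (ih v hv))

lemma pv_mem_heads : ∀ (l : List Int), ∀ v ∈ l, v ∈ pvHeads l := by
  intro l
  induction l using pvHeads.induct with
  | case1 => intro v hv; simp at hv
  | case2 j rest ih =>
      intro v hv
      rw [pvHeads, List.mem_cons]
      rw [List.mem_cons] at hv
      rcases hv with hv | hv
      · exact Or.inl hv
      · rw [← List.takeWhile_append_dropWhile (p := fun y => y == j) (l := rest),
            List.mem_append] at hv
        rcases hv with hv | hv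
        · exact Or.inl (by simpa using List.mem_takeWhile_imp hv)
        · exact Or.inr (ih v hv)

lemma pv_dropWhile_gt (j : Int) :
    ∀ (l : List Int), l.Pairwise (· ≤ ·) → (∀ y ∈ l, j ≤ y) →
      ∀ y ∈ l.dropWhile (fun y => y == j), j < y := by
  intro l
  induction l with
  | nil => intro _ _ y hy; simp at hy
  | cons h t ih =>
      intro hp hge y hy
      rw [List.dropWhile_cons] at hy
      by_cases hh : (h == j) = true
      · rw [if_pos hh] at hy
        exact ih (List.Pairwise.sublist (List.sublist_cons_self h t) hp)
          (fun y hy => hge y (List.mem_cons_of_mem _ hy)) y hy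
      · rw [if_neg hh] at hy
        have hhj : h ≠ j := by simpa using hh
        have hjh : j < h := lt_of_le_of_ne (hge h List.mem_cons_self) (Ne.symm hhj)
        rw [List.mem_cons] at hy
        rcases hy with rfl | hy
        · exact hjh
        · exact lt_of_lt_of_le hjh (List.rel_of_pairwise_cons hp hy)

-- pvScan over a ≤-sorted list is the pvF-fold over the run heads with the list's counts
lemma pv_scan_eq (md2 : Int) :
    ∀ (N : Nat) (L : List Int), L.length ≤ N → L.Pairwise (· ≤ ·) →
      ∀ (k res : Int),
        pvScan md2 k res L
          = ((pvHeads L).foldl (pvF md2 (fun j => ((L.count j : Nat) : Int))) (k, res)).2 := by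
  intro N
  induction N with
  | zero =>
      intro L hL _ k res
      have : L = [] := List.eq_nil_of_length_eq_zero (by omega)
      subst this
      simp [pvScan, pvHeads]
  | succ N ih =>
      intro L hL hp k res
      match L with
      | [] => simp [pvScan, pvHeads]
      | j :: rest =>
          rw [pvScan, pvHeads, List.foldl_cons]
          have hrest : rest = rest.takeWhile (fun y => y == j) ++ rest.dropWhile (fun y => y == j) :=
            (List.takeWhile_append_dropWhile ..).symm
          set run := rest.takeWhile (fun y => y == j) with hrun
          set rest' := rest.dropWhile (fun y => y == j) with hrest'
          have hprest : rest.Pairwise (· ≤ ·) :=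
            List.Pairwise.sublist (List.sublist_cons_self j rest) hp
          have hge : ∀ y ∈ rest, j ≤ y := fun y hy => List.rel_of_pairwise_cons hp hy
          have hgt : ∀ y ∈ rest', j < y := pv_dropWhile_gt j rest hprest hge
          have hjnot : j ∉ rest' := fun h => lt_irrefl j (hgt j h)
          have hcrun : run.count j = run.length :=
            List.count_eq_length.mpr (fun b hb => by
              have h2 : b = j := by simpa using List.mem_takeWhile_imp hb
              exact h2.symm)
          have hcount : (j :: rest).count j = 1 + run.length := by
            rw [List.count_cons_self, hrest, List.count_append, hcrun,
                List.count_eq_zero.mpr hjnot]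
            omega
          have hcnt_rest' : ∀ v ∈ rest', (j :: rest).count v = rest'.count v := by
            intro v hv
            have hvj : v ≠ j := fun h => lt_irrefl j (h ▸ hgt v hv)
            have hvrun : v ∉ run := fun h => hvj (by simpa using List.mem_takeWhile_imp h)
            rw [List.count_cons_of_ne (fun h => hvj h.symm), hrest, List.count_append,
                List.count_eq_zero.mpr hvrun, Nat.zero_add]
          have hlen' : rest'.length ≤ N := by
            have h1 := List.length_dropWhile_le (fun y => y == j) rest
            rw [← hrest'] at h1
            simp only [List.length_cons] at hL
            omega
          have hprest' : rest'.Pairwise (· ≤ ·) :=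
            List.Pairwise.sublist (List.dropWhile_sublist _) hprest
          rw [ih rest' hlen' hprest']
          have hc : (1 : Int) + (run.length : Int) = (((j :: rest).count j : Nat) : Int) := by
            rw [hcount]; push_cast; ring
          have hstep : pvF md2 (fun v => (((j :: rest).count v : Nat) : Int)) (k, res) j
              = (k + (1 + (run.length : Int)),
                 res + PySem.Int.floordiv ((2 * k + 1 + (1 + (run.length : Int))) * (1 + (run.length : Int))) 2 * (j - md2)) := by
            simp only [pvF, ← hc]
          rw [hstep]
          congr 1
          exact PySem.List.foldl_congr_mem (pvHeads rest') _ _ _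
            (fun acc v hv => by
              simp only [pvF, hcnt_rest' v (pv_heads_subset rest' v hv)])

-- the run heads of a ≤-sorted list are strictly increasing
lemma pv_heads_strict :
    ∀ (N : Nat) (L : List Int), L.length ≤ N → L.Pairwise (· ≤ ·) →
      (pvHeads L).Pairwise (· < ·) := by
  intro N
  induction N with
  | zero =>
      intro L hL _
      have : L = [] := List.eq_nil_of_length_eq_zero (by omega)
      subst this
      simp [pvHeads]
  | succ N ih =>
      intro L hL hp
      match L with
      | [] => simp [pvHeads]
      | j :: rest =>
          have hprest : rest.Pairwise (· ≤ ·) :=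
            List.Pairwise.sublist (List.sublist_cons_self j rest) hp
          have hge : ∀ y ∈ rest, j ≤ y := fun y hy => List.rel_of_pairwise_cons hp hy
          have hgt : ∀ y ∈ rest.dropWhile (fun y => y == j), j < y :=
            pv_dropWhile_gt j rest hprest hge
          have hlen' : (rest.dropWhile (fun y => y == j)).length ≤ N := by
            have h1 := List.length_dropWhile_le (fun y => y == j) rest
            simp only [List.length_cons] at hL
            omega
          have hprest' : (rest.dropWhile (fun y => y == j)).Pairwise (· ≤ ·) :=
            List.Pairwise.sublist (List.dropWhile_sublist _) hprest
          rw [pvHeads]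
          exact List.Pairwise.cons
            (fun v hv => hgt v (pv_heads_subset _ v hv))
            (ih _ hlen' hprest')

-- ===== VERDICT (by name: the statement is the Claim_ definition above) =====
theorem analyze_trimpazation_spec : Claim_equal_analyze_trimpazation := by
  intro n m q0 _ hpre
  unfold Spec_analyze_trimpazation analyze_trimpazation analyze_trimpazation_alt
  dsimp only
  have hrangelen : (PySem.List.pyRange 0 n 1).length = n.toNat := by
    rw [PySem.List.length_pyRange_one]; norm_num
  rw [pv_foldl_ignore (pvStepA m), pv_foldl_ignore (pvStepB m), hrangelen]
  set xs := pvGen m q0 n.toNat with hxs_def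
  set c0 : List Int := List.replicate m.toNat 0 with hc0
  -- bounds on the generated residues
  have hb : ∀ x ∈ xs, 0 ≤ x ∧ x < ((m.toNat : Nat) : Int) := by
    rcases hpre with hm | hn
    · intro x hx
      have := pv_gen_bounds m hm n.toNat q0 x hx
      omega
    · intro x hx
      rw [hxs_def] at hx
      have : n.toNat = 0 := Int.toNat_of_nonpos hn
      rw [this] at hx
      cases hx
  -- ===== A side =====
  set cA : Array Int := ((pvStepA m)^[n.toNat] (q0, Array.replicate m.toNat 0)).2 with hcA
  have hAlist : cA.toList = xs.foldl pvUpd c0 := by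
    rw [hcA, pv_iterA m n.toNat q0 (Array.replicate m.toNat 0)]
    simp only [Array.toList_replicate]
    rfl
  have hc0len : c0.length = m.toNat := List.length_replicate
  have hbc : ∀ x ∈ xs, 0 ≤ x ∧ x < (c0.length : Int) := by rw [hc0len]; exact hb
  obtain ⟨hAlen, hAget⟩ := pv_updA_spec xs c0 hbc
  have hsize : ((cA.size : Nat) : Int) = ((m.toNat : Nat) : Int) := by
    have : cA.size = cA.toList.length := by simp
    rw [this, hAlist, hAlen, hc0len]
  rw [hsize]
  have hcnt : ∀ j : Int, 0 ≤ j → j < ((m.toNat : Nat) : Int) →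
      cA.getD j.toNat 0 = ((xs.count j : Nat) : Int) := by
    intro j hj0 hjlt
    rw [pv_arr_getD, hAlist, hAget j hj0 (by omega)]
    have : c0.getD j.toNat 0 = 0 := by
      rw [List.getD_eq_getElem _ _ (by simp [hc0]; omega)]
      simp [hc0]
    rw [this, zero_add]
  have hbody : pvBodyA (PySem.Int.floordiv m 2) cA
      = pvF (PySem.Int.floordiv m 2) (fun j => cA.getD j.toNat 0) := by
    funext ir j; exact pv_bodyA_eq _ _ ir j
  rw [hbody]
  rw [PySem.List.foldl_congr_mem
    (PySem.List.pyRange 0 ((m.toNat : Nat) : Int) 1)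
    (pvF (PySem.Int.floordiv m 2) (fun j => cA.getD j.toNat 0))
    (pvF (PySem.Int.floordiv m 2) (fun j => ((xs.count j : Nat) : Int)))
    (0, 0)
    (by
      intro acc j hj
      rw [PySem.List.mem_pyRange_one] at hj
      simp only [pvF, hcnt j hj.1 hj.2])]
  rw [pv_foldl_filter (pvF (PySem.Int.floordiv m 2) (fun j => ((xs.count j : Nat) : Int)))
    (fun j => decide (xs.count j ≠ 0))
    (by
      intro s j hpj
      have hz : xs.count j = 0 := by simpa using hpj
      simp [pvF, hz, PySem.Int.floordiv])]
  -- ===== B side =====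
  have hvals : ((pvStepB m)^[n.toNat] (q0, #[])).2.toList = xs := by
    rw [pv_iterB m n.toNat q0 #[]]
    simpa using hxs_def.symm
  rw [hvals]
  set L := xs.mergeSort (fun a b => decide (a ≤ b)) with hL
  have hperm : L.Perm xs := List.mergeSort_perm xs _
  have hpL : L.Pairwise (· ≤ ·) := by
    have := List.pairwise_mergeSort
      (le := fun a b : Int => decide (a ≤ b))
      (fun a b c hab hbc => by simp at *; omega)
      (fun a b => by simp [Int.le_total]) xs
    simpa using this
  rw [pv_scan_eq (PySem.Int.floordiv m 2) L.length L le_rfl hpL 0 0]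
  -- counts of L are counts of xs
  have hLcount : (fun j => ((L.count j : Nat) : Int)) = fun j => ((xs.count j : Nat) : Int) := by
    funext j
    rw [hperm.count_eq]
  rw [hLcount]
  -- the run heads of L are exactly the filtered range
  have hheads : pvHeads L = (PySem.List.pyRange 0 ((m.toNat : Nat) : Int) 1).filter
      (fun j => decide (xs.count j ≠ 0)) := by
    apply List.Perm.eq_of_pairwise (le := fun a b : Int => a < b)
      (fun a b _ _ h1 h2 => by omega)
      (pv_heads_strict L.length L le_rfl hpL)
      ((PySem.List.pairwise_lt_pyRange_one 0 _).filter _)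
    have hnd1 : (pvHeads L).Nodup :=
      List.Pairwise.imp (fun h => ne_of_lt h) (pv_heads_strict L.length L le_rfl hpL)
    have hnd2 : ((PySem.List.pyRange 0 ((m.toNat : Nat) : Int) 1).filter
        (fun j => decide (xs.count j ≠ 0))).Nodup :=
      List.Pairwise.imp (fun h => ne_of_lt h)
        ((PySem.List.pairwise_lt_pyRange_one 0 _).filter _)
    rw [List.perm_ext_iff_of_nodup hnd1 hnd2]
    intro v
    constructor
    · intro hv
      have hvL : v ∈ L := pv_heads_subset L v hv
      have hvxs : v ∈ xs := hperm.mem_iff.mp hvL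
      have := hb v hvxs
      rw [List.mem_filter, PySem.List.mem_pyRange_one]
      have hc := List.count_pos_iff.mpr hvxs
      exact ⟨⟨this.1, this.2⟩, by simp; omega⟩
    · intro hv
      rw [List.mem_filter] at hv
      have hvxs : v ∈ xs := List.count_pos_iff.mp (by
        have := hv.2
        simp at this
        omega)
      exact pv_mem_heads L v (hperm.mem_iff.mpr hvxs)
  rw [hheads]
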